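-- pv_equiv track=rewrite | github.com/JAMoreno-Larios/hangman_sdd_test | src/hangman/word_selector.py | filter_words_by_difficulty
-- ===== SOURCE A (Python) =====
-- def filter_words_by_difficulty(words: list[str], difficulty: str) -> list[str]:
--     if difficulty == "easy":
--         return [w for w in words if len(w) < 6]
--     elif difficulty == "medium":
--         return [w for w in words if 6 <= len(w) <= 12]
--     elif difficulty == "hard":
--         return [w for w in words if len(w) > 12]
--     return words
-- ===== SOURCE B (Python) =====
-- def filter_words_by_difficulty(words: list[str], difficulty: str) -> list[str]:
--     # Stage 1: one pass partitioning every word into its difficulty bucket.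
--     buckets = {"easy": [], "medium": [], "hard": []}
--     for w in words:
--         n = len(w)
--         key = "easy" if n < 6 else "medium" if n <= 12 else "hard"
--         buckets[key].append(w)
--     # Stage 2: look up the requested bucket; unknown difficulty -> original list.
--     if difficulty in buckets:
--         return buckets[difficulty]
--     return words
-- ===== Notes on version B (the rewrite author's own statement) =====
-- stated objective: alternative
-- what changed: B partitions all words into three difficulty buckets in a single pass (an index built once) and then returns the bucket looked up by the difficulty key, instead of A's per-difficulty branch each running its own filter predicate.
import Mathlib
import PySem

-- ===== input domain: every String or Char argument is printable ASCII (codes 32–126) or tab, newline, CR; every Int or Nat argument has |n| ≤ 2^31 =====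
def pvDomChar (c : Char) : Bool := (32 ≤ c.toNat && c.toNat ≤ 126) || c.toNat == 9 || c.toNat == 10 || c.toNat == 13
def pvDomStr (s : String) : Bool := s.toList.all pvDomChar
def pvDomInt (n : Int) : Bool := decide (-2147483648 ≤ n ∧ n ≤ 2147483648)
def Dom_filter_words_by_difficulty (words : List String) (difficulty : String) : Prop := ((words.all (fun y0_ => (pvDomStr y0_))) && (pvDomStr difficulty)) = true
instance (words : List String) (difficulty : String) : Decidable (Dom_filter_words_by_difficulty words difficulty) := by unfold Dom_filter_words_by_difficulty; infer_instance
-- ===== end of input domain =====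

-- ===== PORT A =====
-- A: three branch-specific length filters, else the list unchanged.
def filter_words_by_difficulty (words : List String) (difficulty : String) : List String :=
  if difficulty == "easy" then
    words.filter (fun w => decide (PySem.Str.len w < 6))
  else if difficulty == "medium" then
    words.filter (fun w => decide (6 ≤ PySem.Str.len w ∧ PySem.Str.len w ≤ 12))
  else if difficulty == "hard" then
    words.filter (fun w => decide (PySem.Str.len w > 12))
  else words

-- ===== PORT B =====
-- B: one pass partitioning every word into its bucket, then a lookup by key.
def pvBucketStep (acc : List String × List String × List String) (w : String) :
    List String × List String × List String :=
  let n := PySem.Str.len w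
  if n < 6 then (acc.1 ++ [w], acc.2.1, acc.2.2)
  else if n ≤ 12 then (acc.1, acc.2.1 ++ [w], acc.2.2)
  else (acc.1, acc.2.1, acc.2.2 ++ [w])

def filter_words_by_difficulty_alt (words : List String) (difficulty : String) : List String :=
  let buckets := words.foldl pvBucketStep ([], [], [])
  if difficulty == "easy" then buckets.1
  else if difficulty == "medium" then buckets.2.1
  else if difficulty == "hard" then buckets.2.2
  else words

-- ===== PRECONDITION & SPEC =====
def Spec_filter_words_by_difficulty (words : List String) (difficulty : String) (out : List String) : Prop := out = filter_words_by_difficulty_alt words difficulty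
instance (words : List String) (difficulty : String) (out : List String) : Decidable (Spec_filter_words_by_difficulty words difficulty out) := by unfold Spec_filter_words_by_difficulty; infer_instance

-- ===== CLAIM =====
def Claim_equal_filter_words_by_difficulty : Prop := ∀ (words : List String) (difficulty : String), Dom_filter_words_by_difficulty words difficulty → Spec_filter_words_by_difficulty words difficulty (filter_words_by_difficulty words difficulty)

-- ===== LEMMAS AND PROOFS =====
theorem pvBucketStep_eq (e m h : List String) (w : String) :
    pvBucketStep (e, m, h) w =
      if PySem.Str.len w < 6 then (e ++ [w], m, h)
      else if PySem.Str.len w ≤ 12 then (e, m ++ [w], h)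
      else (e, m, h ++ [w]) := by
  simp [pvBucketStep]

-- Loop invariant: the fold's three accumulators are the three filtered lists.
theorem pvBuckets_inv (words : List String) (e m h : List String) :
    words.foldl pvBucketStep (e, m, h) =
      (e ++ words.filter (fun w => decide (PySem.Str.len w < 6)),
       m ++ words.filter (fun w => decide (6 ≤ PySem.Str.len w ∧ PySem.Str.len w ≤ 12)),
       h ++ words.filter (fun w => decide (PySem.Str.len w > 12))) := by
  induction words generalizing e m h with
  | nil => simp
  | cons w ws ih =>
    simp only [List.foldl_cons, List.filter_cons]
    rw [pvBucketStep_eq]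
    by_cases h1 : PySem.Str.len w < 6
    · rw [if_pos h1, ih, decide_eq_true h1,
          decide_eq_false (show ¬(6 ≤ PySem.Str.len w ∧ PySem.Str.len w ≤ 12) by omega),
          decide_eq_false (show ¬(PySem.Str.len w > 12) by omega)]
      simp
    · by_cases h2 : PySem.Str.len w ≤ 12
      · rw [if_neg h1, if_pos h2, ih,
            decide_eq_false h1,
            decide_eq_true (show 6 ≤ PySem.Str.len w ∧ PySem.Str.len w ≤ 12 by omega),
            decide_eq_false (show ¬(PySem.Str.len w > 12) by omega)]
        simp
      · rw [if_neg h1, if_neg h2, ih,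
            decide_eq_false h1,
            decide_eq_false (show ¬(6 ≤ PySem.Str.len w ∧ PySem.Str.len w ≤ 12) by omega),
            decide_eq_true (show PySem.Str.len w > 12 by omega)]
        simp

-- ===== VERDICT =====
theorem filter_words_by_difficulty_spec : Claim_equal_filter_words_by_difficulty := by
  intro words difficulty _
  unfold Spec_filter_words_by_difficulty filter_words_by_difficulty filter_words_by_difficulty_alt
  simp only [pvBuckets_inv words [] [] []]
  by_cases h1 : difficulty = "easy"
  · simp [h1]
  · by_cases h2 : difficulty = "medium"
    · simp [h2]
    · by_cases h3 : difficulty = "hard"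
      · simp [h3]
      · simp [h1, h2, h3]
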